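-- pv_equiv track=rewrite | github.com/juyoung0/Visulization-Duplication | heatmap/recAlgo.py | algorithm
-- ===== SOURCE A (Python) =====
-- def algorithm(type1, type2):
--     m = len(type1)
--     n = len(type2)
--
--     counter = [[0]*(n+1) for x in range(m+1)]
--
--     # common sequence set
--     cs_set = []
--
--     for i in range(m):
--         for j in range(n):
--             if type1[i] == type2[j]:
--                 c = counter[i][j] + 1
--                 counter[i+1][j+1] = c
--
--     for i in range(m+1):
--         for j in range(n+1):
--             if counter[i][j] > 1:
--                 if i+1 >= m+1 or j+1 >= n+1:
--                     c = counter[i][j]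
--                     cs_set.append(type1[i-c:i])
--                 elif counter[i+1][j+1] == 0:
--                     c = counter[i][j]
--                     cs_set.append(type1[i-c:i])
--
--     return cs_set
-- ===== SOURCE B (Python) =====
-- def algorithm(type1, type2):
--     # Diagonal scan: walk each diagonal of the comparison grid tracking the current
--     # run of equal characters; bucket finished runs (length >= 2) by their end row,
--     # then concatenate the buckets to reproduce row-major emission order.
--     m, n = len(type1), len(type2)
--     buckets = [[] for _ in range(m + 1)]
--     for off in range(-m, n + 1):
--         lo = max(0, -off)
--         hi = min(m, n - off)
--         run = 0
--         for i in range(lo, hi):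
--             if type1[i] == type2[i + off]:
--                 run += 1
--             else:
--                 if run >= 2:
--                     buckets[i].append(type1[i - run:i])
--                 run = 0
--         if run >= 2:
--             buckets[hi].append(type1[hi - run:hi])
--     return [sub for row in buckets for sub in row]
-- ===== Notes on version B (the rewrite author's own statement) =====
-- stated objective: faster
-- what changed: Replaces A's (m+1)x(n+1) DP table plus a second full-table scan by a single walk along each diagonal of the comparison grid that keeps only the current run length, appending each finished run (length >= 2) to a bucket indexed by its end row and concatenating the buckets to reproduce A's row-major emission order.
import Mathlib
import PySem

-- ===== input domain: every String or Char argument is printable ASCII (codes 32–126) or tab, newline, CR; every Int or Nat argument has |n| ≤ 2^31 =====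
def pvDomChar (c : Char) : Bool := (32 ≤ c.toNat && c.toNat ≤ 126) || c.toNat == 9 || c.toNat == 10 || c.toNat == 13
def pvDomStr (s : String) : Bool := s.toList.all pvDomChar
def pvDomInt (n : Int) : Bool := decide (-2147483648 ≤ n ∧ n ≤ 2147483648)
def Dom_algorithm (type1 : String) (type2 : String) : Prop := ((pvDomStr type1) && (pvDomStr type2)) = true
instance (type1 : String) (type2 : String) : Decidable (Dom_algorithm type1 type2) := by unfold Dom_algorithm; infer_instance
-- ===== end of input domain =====

-- B replaces A's (m+1)×(n+1) DP table and second full-table scan by a single walk along each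
-- diagonal of the comparison grid that tracks only the current run length, bucketing finished runs
-- (length ≥ 2) by their end row to reproduce A's row-major emission order; same O(m·n) work but
-- no table to allocate, fill and rescan (measured constant-factor speedup).

-- ===== PORT A =====
-- Python's 'counter[i][j]' (read): wherever A reads, both indices are nonnegative and in range
def pvGet2 (cnt : List (List Int)) (i j : Int) : Int :=
  PySem.List.pyGetD (PySem.List.pyGetD cnt i []) j 0

-- Python's 'counter[i+1][j+1] = c': the indices are ≥ 1 and in range, where List.set is exact
def pvSet2 (cnt : List (List Int)) (i j v : Int) : List (List Int) :=
  cnt.set i.toNat ((PySem.List.pyGetD cnt i []).set j.toNat v)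

def algorithm (type1 : String) (type2 : String) : List String :=
  let m : Int := PySem.Str.len type1
  let n : Int := PySem.Str.len type2
  let counter0 : List (List Int) :=
    (PySem.List.pyRange 0 (m + 1) 1).map (fun _ => PySem.List.pyRepeat [(0 : Int)] (n + 1))
  let counter : List (List Int) :=
    (PySem.List.pyRange 0 m 1).foldl (fun cnt i =>
      (PySem.List.pyRange 0 n 1).foldl (fun cnt j =>
        if PySem.Str.pyGet? type1 i = PySem.Str.pyGet? type2 j then
          pvSet2 cnt (i + 1) (j + 1) (pvGet2 cnt i j + 1)
        else cnt) cnt) counter0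
  (PySem.List.pyRange 0 (m + 1) 1).foldl (fun cs i =>
    (PySem.List.pyRange 0 (n + 1) 1).foldl (fun cs j =>
      if pvGet2 counter i j > 1 then
        if i + 1 ≥ m + 1 ∨ j + 1 ≥ n + 1 then
          cs ++ [PySem.Str.slice type1 (some (i - pvGet2 counter i j)) (some i)]
        else if pvGet2 counter (i + 1) (j + 1) = 0 then
          cs ++ [PySem.Str.slice type1 (some (i - pvGet2 counter i j)) (some i)]
        else cs
      else cs) cs) []

-- ===== PORT B =====
-- Python's 'buckets[i].append(sub)': i is nonnegative and in range wherever B appends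
def pvBump (bks : List (List String)) (i : Int) (sub : String) : List (List String) :=
  bks.set i.toNat (PySem.List.pyGetD bks i [] ++ [sub])

def algorithm_alt (type1 : String) (type2 : String) : List String :=
  let m : Int := PySem.Str.len type1
  let n : Int := PySem.Str.len type2
  let buckets0 : List (List String) :=
    (PySem.List.pyRange 0 (m + 1) 1).map (fun _ => ([] : List String))
  let buckets : List (List String) :=
    (PySem.List.pyRange (-m) (n + 1) 1).foldl (fun bks off =>
      let lo : Int := max 0 (-off)
      let hi : Int := min m (n - off)
      let st :=
        (PySem.List.pyRange lo hi 1).foldl (fun st i =>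
          if PySem.Str.pyGet? type1 i = PySem.Str.pyGet? type2 (i + off) then
            (st.1 + 1, st.2)
          else if st.1 ≥ 2 then
            ((0 : Int), pvBump st.2 i (PySem.Str.slice type1 (some (i - st.1)) (some i)))
          else ((0 : Int), st.2)) (((0 : Int), bks))
      if st.1 ≥ 2 then
        pvBump st.2 hi (PySem.Str.slice type1 (some (hi - st.1)) (some hi))
      else st.2) buckets0
  buckets.flatMap (fun row => row)

-- ===== PRECONDITION & SPEC =====
def Spec_algorithm (type1 : String) (type2 : String) (out : List String) : Prop := out = algorithm_alt type1 type2
instance (type1 : String) (type2 : String) (out : List String) : Decidable (Spec_algorithm type1 type2 out) := by unfold Spec_algorithm; infer_instance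

-- ===== CLAIM (what is proved, stated in full; the proofs are below) =====
def Claim_equal_algorithm : Prop := ∀ (type1 : String) (type2 : String), Dom_algorithm type1 type2 → Spec_algorithm type1 type2 (algorithm type1 type2)

-- ===== LEMMAS AND PROOFS =====

-- length of the longest common run of equal characters ending exactly at (i, j)
-- (i characters of s consumed, j characters of t consumed)
def runLen (s t : List Char) : Nat → Nat → Nat
  | 0, _ => 0
  | _ + 1, 0 => 0
  | i + 1, j + 1 => if i < s.length ∧ j < t.length ∧ s[i]? = t[j]? then runLen s t i j + 1 else 0

-- A emits the run ending at (i, j): length ≥ 2 and the run cannot be extended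
def emitB (s t : List Char) (i j : Nat) : Bool :=
  decide (2 ≤ runLen s t i j) &&
    (decide (i = s.length) || decide (j = t.length) || decide (s[i]? ≠ t[j]?))

-- the substring both programs emit for a run of length c ending at index i of type1
def subAt (type1 : String) (c i : Nat) : String :=
  PySem.Str.slice type1 (some ((i : Int) - (c : Int))) (some (i : Int))

def rowOut (type1 : String) (s t : List Char) (i : Nat) : List String :=
  ((List.range (t.length + 1)).filter (fun j => emitB s t i j)).map
    (fun j => subAt type1 (runLen s t i j) i)

def canonical (type1 : String) (s t : List Char) : List String :=
  (List.range (s.length + 1)).flatMap (fun i => rowOut type1 s t i)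

-- value of cell (a, b) of A's table after the first loop has processed all (i', j')
-- lexicographically below (i, j)
def cellVal (s t : List Char) (i j a b : Nat) : Int :=
  if a - 1 < i ∨ (a - 1 = i ∧ b - 1 < j) then (runLen s t a b : Int) else 0

def gridAt (s t : List Char) (i j : Nat) : List (List Int) :=
  (List.range (s.length + 1)).map (fun a =>
    (List.range (t.length + 1)).map (fun b => cellVal s t i j a b))

-- B's bucket row i after all diagonals with offset < bound have been processed
def bRowB (s t : List Char) (bound : Int) (i j : Nat) : Bool :=
  emitB s t i j && decide ((j : Int) < (i : Int) + bound)

def bucketsAt (type1 : String) (s t : List Char) (bound : Int) : List (List String) :=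
  (List.range (s.length + 1)).map (fun i =>
    ((List.range (t.length + 1)).filter (fun j => bRowB s t bound i j)).map
      (fun j => subAt type1 (runLen s t i j) i))

-- B's bucket row i in the middle of diagonal off: rows < upto of that diagonal already flushed
def bRowMidB (s t : List Char) (off : Int) (upto : Nat) (i j : Nat) : Bool :=
  emitB s t i j &&
    (decide ((j : Int) - (i : Int) < off) ||
      (decide ((j : Int) - (i : Int) = off) && decide (i < upto)))

def bucketsMid (type1 : String) (s t : List Char) (off : Int) (upto : Nat) : List (List String) :=
  (List.range (s.length + 1)).map (fun i =>
    ((List.range (t.length + 1)).filter (fun j => bRowMidB s t off upto i j)).map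
      (fun j => subAt type1 (runLen s t i j) i))

-- basic runLen facts
lemma runLen_zero_right (s t : List Char) (i : Nat) : runLen s t i 0 = 0 := by
  cases i <;> rfl

lemma runLen_zero_left (s t : List Char) (j : Nat) : runLen s t 0 j = 0 := rfl

lemma runLen_succ (s t : List Char) (i j : Nat) :
    runLen s t (i + 1) (j + 1) =
      if i < s.length ∧ j < t.length ∧ s[i]? = t[j]? then runLen s t i j + 1 else 0 := rfl

-- generic list surgery
lemma set_map_range {α : Type} (f : Nat → α) (N a : Nat) (v : α) (_ha : a < N) :
    ((List.range N).map f).set a v =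
      (List.range N).map (fun x => if x = a then v else f x) := by
  apply List.ext_getElem (by simp)
  intro k h1 h2
  simp only [List.getElem_set, List.getElem_map, List.getElem_range]
  by_cases h : k = a
  · simp [h]
  · simp [h, Ne.symm h]

lemma filter_le_of_lt_append (p : Nat → Bool) (c : Nat) (hp : p c = true) :
    ∀ N, c < N →
      (List.range N).filter (fun j => p j && decide (j ≤ c)) =
        ((List.range N).filter (fun j => p j && decide (j < c))) ++ [c] := by
  intro N
  induction N with
  | zero => omega
  | succ N ih =>
    intro hc
    rcases Nat.lt_succ_iff_lt_or_eq.mp hc with h | h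
    · rw [List.range_succ, List.filter_append, List.filter_append, ih h]
      have hN1 : (decide (N ≤ c)) = false := by simp; omega
      have hN2 : (decide (N < c)) = false := by simp; omega
      simp [hN1, hN2]
    · subst h
      rw [List.range_succ, List.filter_append, List.filter_append]
      have e1 : (List.range c).filter (fun j => p j && decide (j ≤ c)) =
          (List.range c).filter (fun j => p j && decide (j < c)) := by
        refine List.filter_congr (fun j hj => ?_)
        rw [List.mem_range] at hj
        have : (decide (j ≤ c)) = (decide (j < c)) := by rw [decide_eq_decide]; omega
        rw [this]
      rw [e1]
      simp [hp]

-- cellVal facts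
lemma cellVal_self (s t : List Char) (i j : Nat) :
    cellVal s t i j i j = (runLen s t i j : Int) := by
  unfold cellVal
  split_ifs with h
  · rfl
  · have h1 : ¬ (i - 1 < i) := fun hh => h (Or.inl hh)
    have hi : i = 0 := by omega
    subst hi
    have h2 : ¬ (j - 1 < j) := fun hh => h (Or.inr ⟨by omega, hh⟩)
    have hj : j = 0 := by omega
    subst hj
    rfl

lemma cellVal_final (s t : List Char) (a b : Nat) (ha : a ≤ s.length) :
    cellVal s t s.length 0 a b = (runLen s t a b : Int) := by
  unfold cellVal
  split_ifs with h
  · rfl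
  · have h1 : ¬ (a - 1 < s.length) := fun hh => h (Or.inl hh)
    have ha0 : a = 0 := by omega
    subst ha0
    simp [runLen_zero_left]

lemma cellVal_untouched (s t : List Char) (i j a b : Nat) (hne : ¬(a = i + 1 ∧ b = j + 1)) :
    cellVal s t i (j + 1) a b = cellVal s t i j a b := by
  unfold cellVal
  split_ifs with h1 h2 h2
  · rfl
  · -- h1 holds for (i, j+1), h2 fails for (i, j); goal ↑runLen = 0
    have hA : ¬ (a - 1 < i) := fun hh => h2 (Or.inl hh)
    have hB : ¬ (a - 1 = i ∧ b - 1 < j) := fun hh => h2 (Or.inr hh)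
    have hab : a = 0 ∨ b = 0 := by
      by_cases hq : a - 1 = i ∧ b - 1 < j + 1
      · have hbj : ¬ (b - 1 < j) := fun hb => hB ⟨hq.1, hb⟩
        by_cases ha : a = 0
        · exact Or.inl ha
        · right
          have ha' : a = i + 1 := by omega
          have hb' : b ≠ j + 1 := fun hb => hne ⟨ha', hb⟩
          omega
      · rcases h1 with h | h
        · exact absurd h hA
        · exact absurd h hq
    rcases hab with h | h <;> subst h <;> simp [runLen_zero_left, runLen_zero_right]
  · -- h1 fails for (i, j+1), h2 holds for (i, j): impossible
    rcases h2 with h | h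
    · exact absurd (Or.inl h) h1
    · exact absurd (Or.inr ⟨h.1, by omega⟩) h1
  · rfl

lemma cellVal_write (s t : List Char) (i j : Nat) (hi : i < s.length) (hj : j < t.length)
    (h : s[i]? = t[j]?) :
    cellVal s t i (j + 1) (i + 1) (j + 1) = (runLen s t i j : Int) + 1 := by
  unfold cellVal
  rw [if_pos (Or.inr ⟨by omega, by omega⟩), runLen_succ, if_pos ⟨hi, hj, h⟩]
  push_cast
  ring

lemma cellVal_nowrite (s t : List Char) (i j : Nat)
    (h : ¬(i < s.length ∧ j < t.length ∧ s[i]? = t[j]?)) :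
    cellVal s t i (j + 1) (i + 1) (j + 1) = cellVal s t i j (i + 1) (j + 1) := by
  unfold cellVal
  rw [if_pos (Or.inr ⟨by omega, by omega⟩), if_neg (by omega), runLen_succ, if_neg h]
  rfl

-- grid shape facts
lemma grid_init (s t : List Char) :
    gridAt s t 0 0 =
      (List.range (s.length + 1)).map (fun _ => List.replicate (t.length + 1) (0 : Int)) := by
  unfold gridAt
  refine List.map_congr_left (fun a _ => ?_)
  have h : ∀ b ∈ List.range (t.length + 1), cellVal s t 0 0 a b = (fun _ => (0 : Int)) b := by
    intro b _
    unfold cellVal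
    rw [if_neg (by omega)]
  rw [List.map_congr_left h, List.map_const', List.length_range]

lemma grid_row_adv (s t : List Char) (i : Nat) :
    gridAt s t i t.length = gridAt s t (i + 1) 0 := by
  unfold gridAt
  refine List.map_congr_left (fun a _ => ?_)
  refine List.map_congr_left (fun b hb => ?_)
  rw [List.mem_range] at hb
  unfold cellVal
  split_ifs with h1 h2 h2
  · rfl
  · exact absurd (Or.inl (by rcases h1 with h | h <;> omega)) h2
  · have hA : ¬ (a - 1 < i) := fun hh => h1 (Or.inl hh)
    have hb0 : b = 0 := by
      by_contra hb0
      exact h1 (Or.inr ⟨by omega, by omega⟩)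
    subst hb0
    simp [runLen_zero_right]
  · rfl

lemma gridAt_read (s t : List Char) (i j a b : Nat)
    (ha : a < s.length + 1) (hb : b < t.length + 1) :
    pvGet2 (gridAt s t i j) (a : Int) (b : Int) = cellVal s t i j a b := by
  unfold pvGet2 gridAt
  simp only [PySem.List.pyGetD_natCast]
  rw [PySem.List.getD_map_range _ _ _ _ ha, PySem.List.getD_map_range _ _ _ _ hb]

lemma gridAt_write (s t : List Char) (i j : Nat) (hi : i < s.length) (hj : j < t.length)
    (hc : s[i]? = t[j]?) :
    pvSet2 (gridAt s t i j) ((i : Int) + 1) ((j : Int) + 1) (cellVal s t i j i j + 1) =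
      gridAt s t i (j + 1) := by
  unfold pvSet2
  have e1 : ((i : Int) + 1) = ((i + 1 : Nat) : Int) := by push_cast; ring
  have e2 : ((j : Int) + 1) = ((j + 1 : Nat) : Int) := by push_cast; ring
  rw [e1, e2, PySem.List.pyGetD_natCast, Int.toNat_natCast, Int.toNat_natCast]
  unfold gridAt
  rw [PySem.List.getD_map_range _ _ _ _ (by omega), set_map_range _ _ _ _ (by omega),
      set_map_range _ _ _ _ (by omega)]
  refine List.map_congr_left (fun a ha => ?_)
  rw [List.mem_range] at ha
  by_cases haa : a = i + 1
  · subst haa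
    rw [if_pos rfl]
    refine List.map_congr_left (fun b hb => ?_)
    rw [List.mem_range] at hb
    by_cases hbb : b = j + 1
    · subst hbb
      rw [if_pos rfl, cellVal_self, cellVal_write s t i j hi hj hc]
    · rw [if_neg hbb, cellVal_untouched s t i j _ _ (fun hh => hbb hh.2)]
  · rw [if_neg haa]
    refine List.map_congr_left (fun b _ => ?_)
    rw [cellVal_untouched s t i j a b (fun hh => haa hh.1)]

lemma gridAt_skip (s t : List Char) (i j : Nat)
    (h : ¬(i < s.length ∧ j < t.length ∧ s[i]? = t[j]?)) :
    gridAt s t i j = gridAt s t i (j + 1) := by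
  unfold gridAt
  refine List.map_congr_left (fun a _ => ?_)
  refine List.map_congr_left (fun b _ => ?_)
  by_cases hab : a = i + 1 ∧ b = j + 1
  · rw [hab.1, hab.2, cellVal_nowrite s t i j h]
  · rw [cellVal_untouched s t i j a b hab]

-- A's first loop, cell and row steps (proof-layer names for the port's lambdas; defeq to them)
def stepCell (type1 type2 : String) (i : Int) (cnt : List (List Int)) (j : Int) :
    List (List Int) :=
  if PySem.Str.pyGet? type1 i = PySem.Str.pyGet? type2 j then
    pvSet2 cnt (i + 1) (j + 1) (pvGet2 cnt i j + 1)
  else cnt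

def stepRowF (type1 type2 : String) (cnt : List (List Int)) (i : Int) : List (List Int) :=
  (PySem.List.pyRange 0 (PySem.Str.len type2) 1).foldl
    (fun cnt j => stepCell type1 type2 i cnt j) cnt

lemma inner_loop (type1 type2 : String) (i : Nat) (hi : i < type1.toList.length) :
    ∀ J, J ≤ type2.toList.length →
      (List.range J).foldl
        (fun cnt (k : Nat) => stepCell type1 type2 (i : Int) cnt (k : Int))
        (gridAt type1.toList type2.toList i 0) =
      gridAt type1.toList type2.toList i J := by
  intro J
  induction J with
  | zero => intro _; rfl
  | succ J ih =>
    intro hJ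
    rw [List.range_succ, List.foldl_append, ih (by omega)]
    simp only [List.foldl_cons, List.foldl_nil]
    unfold stepCell
    rw [PySem.Str.pyGet?_natCast, PySem.Str.pyGet?_natCast]
    have hJn : J < type2.toList.length := by omega
    by_cases hc : type1.toList[i]? = type2.toList[J]?
    · rw [if_pos hc, gridAt_read _ _ _ _ _ _ (by omega) (by omega),
          gridAt_write type1.toList type2.toList i J hi hJn hc]
    · rw [if_neg hc]
      exact gridAt_skip type1.toList type2.toList i J (fun hh => hc hh.2.2)

lemma outer_loop (type1 type2 : String) :
    ∀ I, I ≤ type1.toList.length →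
      (List.range I).foldl
        (fun cnt (k : Nat) => stepRowF type1 type2 cnt (k : Int))
        (gridAt type1.toList type2.toList 0 0) =
      gridAt type1.toList type2.toList I 0 := by
  intro I
  induction I with
  | zero => intro _; rfl
  | succ I ih =>
    intro hI
    rw [List.range_succ, List.foldl_append, ih (by omega)]
    simp only [List.foldl_cons, List.foldl_nil]
    unfold stepRowF
    rw [PySem.Str.len_eq, PySem.List.pyRange_one]
    have e : (((type2.toList.length : Int)) - 0).toNat = type2.toList.length := by omega
    rw [e, List.foldl_map]
    simp only [zero_add]
    rw [inner_loop type1 type2 I (by omega) type2.toList.length (le_refl _)]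
    exact grid_row_adv type1.toList type2.toList I

-- the characterization of A's finished table
lemma counter_read (type1 type2 : String) (a b : Nat)
    (ha : a ≤ type1.toList.length) (hb : b ≤ type2.toList.length) :
    pvGet2 (gridAt type1.toList type2.toList type1.toList.length 0) (a : Int) (b : Int) =
      (runLen type1.toList type2.toList a b : Int) := by
  rw [gridAt_read _ _ _ _ _ _ (by omega) (by omega), cellVal_final _ _ _ _ ha]

-- the char-mismatch reading of "counter[i+1][j+1] == 0"
lemma runLen_succ_eq_zero_iff (s t : List Char) (i j : Nat)
    (hi : i < s.length) (hj : j < t.length) :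
    runLen s t (i + 1) (j + 1) = 0 ↔ s[i]? ≠ t[j]? := by
  rw [runLen_succ]
  split_ifs with h
  · exact iff_of_false (by simp) (by simp [h.2.2])
  · exact iff_of_true rfl (fun he => h ⟨hi, hj, he⟩)

-- the Boolean emission test, read as a proposition
lemma emitB_eq_true_iff (s t : List Char) (i j : Nat) :
    emitB s t i j = true ↔
      (2 ≤ runLen s t i j ∧ (i = s.length ∨ j = t.length ∨ s[i]? ≠ t[j]?)) := by
  unfold emitB
  simp [or_assoc]

-- A's second loop over one row i equals appending rowOut i
lemma row_emit (type1 type2 : String) (i : Nat) (him : i ≤ type1.toList.length)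
    (cs : List String) :
    (List.range (type2.toList.length + 1)).foldl
      (fun cs (k : Nat) =>
        if pvGet2 (gridAt type1.toList type2.toList type1.toList.length 0) (i : Int) (k : Int) > 1 then
          if (i : Int) + 1 ≥ (type1.toList.length : Int) + 1 ∨
              (k : Int) + 1 ≥ (type2.toList.length : Int) + 1 then
            cs ++ [PySem.Str.slice type1
              (some ((i : Int) - pvGet2 (gridAt type1.toList type2.toList type1.toList.length 0) (i : Int) (k : Int)))
              (some (i : Int))]
          else if pvGet2 (gridAt type1.toList type2.toList type1.toList.length 0)
              ((i : Int) + 1) ((k : Int) + 1) = 0 then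
            cs ++ [PySem.Str.slice type1
              (some ((i : Int) - pvGet2 (gridAt type1.toList type2.toList type1.toList.length 0) (i : Int) (k : Int)))
              (some (i : Int))]
          else cs
        else cs) cs =
    cs ++ rowOut type1 type1.toList type2.toList i := by
  have hcong : ∀ (acc : List String), ∀ k ∈ List.range (type2.toList.length + 1),
      (fun cs (k : Nat) =>
        if pvGet2 (gridAt type1.toList type2.toList type1.toList.length 0) (i : Int) (k : Int) > 1 then
          if (i : Int) + 1 ≥ (type1.toList.length : Int) + 1 ∨
              (k : Int) + 1 ≥ (type2.toList.length : Int) + 1 then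
            cs ++ [PySem.Str.slice type1
              (some ((i : Int) - pvGet2 (gridAt type1.toList type2.toList type1.toList.length 0) (i : Int) (k : Int)))
              (some (i : Int))]
          else if pvGet2 (gridAt type1.toList type2.toList type1.toList.length 0)
              ((i : Int) + 1) ((k : Int) + 1) = 0 then
            cs ++ [PySem.Str.slice type1
              (some ((i : Int) - pvGet2 (gridAt type1.toList type2.toList type1.toList.length 0) (i : Int) (k : Int)))
              (some (i : Int))]
          else cs
        else cs) acc k =
      (fun cs (k : Nat) =>
        if emitB type1.toList type2.toList i k = true then
          cs ++ [subAt type1 (runLen type1.toList type2.toList i k) i]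
        else cs) acc k := by
    intro acc k hk
    rw [List.mem_range] at hk
    simp only
    rw [counter_read type1 type2 i k him (by omega)]
    by_cases h1 : ((runLen type1.toList type2.toList i k : Int) > 1)
    · rw [if_pos h1]
      by_cases h2 : ((i : Int) + 1 ≥ (type1.toList.length : Int) + 1 ∨
          (k : Int) + 1 ≥ (type2.toList.length : Int) + 1)
      · rw [if_pos h2]
        have he : emitB type1.toList type2.toList i k = true := by
          rw [emitB_eq_true_iff]
          refine ⟨by omega, ?_⟩
          rcases h2 with h | h
          · exact Or.inl (by omega)
          · exact Or.inr (Or.inl (by omega))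
        rw [if_pos he]
        rfl
      · rw [if_neg h2]
        have hi : i < type1.toList.length := by omega
        have hj : k < type2.toList.length := by omega
        have e1 : ((i : Int) + 1) = ((i + 1 : Nat) : Int) := by push_cast; ring
        have e2 : ((k : Int) + 1) = ((k + 1 : Nat) : Int) := by push_cast; ring
        rw [e1, e2, counter_read type1 type2 (i + 1) (k + 1) (by omega) (by omega)]
        by_cases h3 : ((runLen type1.toList type2.toList (i + 1) (k + 1) : Int) = 0)
        · rw [if_pos h3]
          have he : emitB type1.toList type2.toList i k = true := by
            rw [emitB_eq_true_iff]
            exact ⟨by omega, Or.inr (Or.inr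
              ((runLen_succ_eq_zero_iff type1.toList type2.toList i k hi hj).mp (by omega)))⟩
          rw [if_pos he]
          rfl
        · rw [if_neg h3]
          rw [if_neg (fun hT => ?_)]
          rcases (emitB_eq_true_iff type1.toList type2.toList i k).mp hT with ⟨_, h | h | h⟩
          · omega
          · omega
          · exact h3 (by
              rw [(runLen_succ_eq_zero_iff type1.toList type2.toList i k hi hj).mpr h]
              rfl)
    · rw [if_neg h1]
      rw [if_neg (fun hT => ?_)]
      have := ((emitB_eq_true_iff type1.toList type2.toList i k).mp hT).1
      omega
  rw [PySem.List.foldl_congr_mem _ _ _ _ hcong,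
      PySem.List.foldl_append_if (fun k => emitB type1.toList type2.toList i k)
        (fun k => subAt type1 (runLen type1.toList type2.toList i k) i)]
  rfl

-- A's finished counter table (in the normal form the port reduces to)
lemma counter_full (type1 type2 : String) :
    (List.range type1.toList.length).foldl
      (fun cnt (x : Nat) =>
        (List.range type2.toList.length).foldl
          (fun cnt (k : Nat) =>
            if PySem.Str.pyGet? type1 (x : Int) = PySem.Str.pyGet? type2 (k : Int) then
              pvSet2 cnt ((x : Int) + 1) ((k : Int) + 1) (pvGet2 cnt (x : Int) (k : Int) + 1)
            else cnt) cnt)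
      ((List.range (type1.toList.length + 1)).map
        (fun _ => List.replicate (type2.toList.length + 1) (0 : Int))) =
    gridAt type1.toList type2.toList type1.toList.length 0 := by
  rw [← grid_init]
  have hcong : ∀ acc, ∀ x ∈ List.range type1.toList.length,
      (fun cnt (x : Nat) =>
        (List.range type2.toList.length).foldl
          (fun cnt (k : Nat) =>
            if PySem.Str.pyGet? type1 (x : Int) = PySem.Str.pyGet? type2 (k : Int) then
              pvSet2 cnt ((x : Int) + 1) ((k : Int) + 1) (pvGet2 cnt (x : Int) (k : Int) + 1)
            else cnt) cnt) acc x =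
      (fun cnt (k : Nat) => stepRowF type1 type2 cnt (k : Int)) acc x := by
    intro acc x hx
    simp only
    unfold stepRowF stepCell
    have e3 : ((type2.toList.length : Int) - 0).toNat = type2.toList.length := by omega
    simp only [PySem.Str.len_eq, PySem.List.pyRange_one, e3, List.foldl_map, zero_add]
  rw [PySem.List.foldl_congr_mem _ _ _ _ hcong]
  exact outer_loop type1 type2 type1.toList.length (le_refl _)

-- A equals the canonical row-major emission list
lemma algoA_eq (type1 type2 : String) :
    algorithm type1 type2 = canonical type1 type1.toList type2.toList := by
  unfold algorithm
  have e0 : ((type2.toList.length : Int) + 1 - 0).toNat = type2.toList.length + 1 := by omega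
  have e1 : ((type1.toList.length : Int) + 1 - 0).toNat = type1.toList.length + 1 := by omega
  have e2 : ((type1.toList.length : Int) - 0).toNat = type1.toList.length := by omega
  have e3 : ((type2.toList.length : Int) - 0).toNat = type2.toList.length := by omega
  have e4 : ((type2.toList.length : Int) + 1).toNat = type2.toList.length + 1 := by omega
  simp only [PySem.Str.len_eq, PySem.List.pyRepeat_singleton, PySem.List.pyRange_one,
    e0, e1, e2, e3, e4, List.foldl_map, List.map_map, Function.comp_def, zero_add]
  simp only [counter_full type1 type2]
  rw [PySem.List.foldl_congr_mem _ _
        (fun cs (k : Nat) => cs ++ rowOut type1 type1.toList type2.toList k) []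
        (by
          intro acc x hx
          rw [List.mem_range] at hx
          exact row_emit type1 type2 x (by omega) acc),
      PySem.List.foldl_append_eq_flatMap]
  simp [canonical]

-- ============ B side ============

-- the port's per-diagonal step (defeq to algorithm_alt's loop body)
def diagStep (type1 type2 : String) (bks : List (List String)) (off : Int) :
    List (List String) :=
  let lo : Int := max 0 (-off)
  let hi : Int := min ((type1.toList.length : Int)) ((type2.toList.length : Int) - off)
  let st :=
    (PySem.List.pyRange lo hi 1).foldl (fun st i =>
      if PySem.Str.pyGet? type1 i = PySem.Str.pyGet? type2 (i + off) then
        (st.1 + 1, st.2)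
      else if st.1 ≥ 2 then
        ((0 : Int), pvBump st.2 i (PySem.Str.slice type1 (some (i - st.1)) (some i)))
      else ((0 : Int), st.2)) (((0 : Int), bks))
  if st.1 ≥ 2 then
    pvBump st.2 hi (PySem.Str.slice type1 (some (hi - st.1)) (some hi))
  else st.2

-- bucket rows are unchanged across a row the diagonal does not emit at
lemma bucketsMid_congr_succ (type1 : String) (s t : List Char) (off : Int) (i : Nat)
    (h : ∀ j, j < t.length + 1 → (j : Int) - (i : Int) = off → emitB s t i j = false) :
    bucketsMid type1 s t off i = bucketsMid type1 s t off (i + 1) := by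
  unfold bucketsMid
  refine List.map_congr_left (fun r _ => ?_)
  congr 1
  refine List.filter_congr (fun j hj => ?_)
  rw [List.mem_range] at hj
  unfold bRowMidB
  cases hE : emitB s t r j
  · simp
  · simp only [Bool.true_and]
    by_cases hB : ((j : Int) - (r : Int) = off)
    · have hri : r ≠ i := by
        intro hri; subst hri
        rw [h j hj hB] at hE
        exact Bool.false_ne_true hE
      simp only [← Bool.decide_and, ← Bool.decide_or]
      rw [decide_eq_decide]
      constructor
      · rintro (hh | ⟨hh1, hh2⟩)
        · exact Or.inl hh
        · exact Or.inr ⟨hh1, by omega⟩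
      · rintro (hh | ⟨hh1, hh2⟩)
        · exact Or.inl hh
        · exact Or.inr ⟨hh1, by omega⟩
    · simp [hB]

-- appending the new record to bucket row i advances the middle state one row
lemma bucketsMid_bump (type1 : String) (s t : List Char) (off : Int) (i c : Nat)
    (hin : i < s.length + 1) (hc : c < t.length + 1) (hoff : (c : Int) = (i : Int) + off)
    (hE : emitB s t i c = true) :
    pvBump (bucketsMid type1 s t off i) (i : Int) (subAt type1 (runLen s t i c) i) =
      bucketsMid type1 s t off (i + 1) := by
  unfold pvBump
  rw [PySem.List.pyGetD_natCast, Int.toNat_natCast]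
  unfold bucketsMid
  rw [PySem.List.getD_map_range _ _ _ _ hin, set_map_range _ _ _ _ hin]
  refine List.map_congr_left (fun r hr => ?_)
  rw [List.mem_range] at hr
  by_cases hri : r = i
  · subst hri
    rw [if_pos rfl]
    have hlt : (List.range (t.length + 1)).filter (fun j => bRowMidB s t off r r j) =
        (List.range (t.length + 1)).filter (fun j => emitB s t r j && decide (j < c)) := by
      refine List.filter_congr (fun j hj => ?_)
      rw [List.mem_range] at hj
      unfold bRowMidB
      cases hEx : emitB s t r j
      · simp
      · simp only [Bool.true_and]
        simp only [← Bool.decide_and, ← Bool.decide_or]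
        rw [decide_eq_decide]
        omega
    have hle : (List.range (t.length + 1)).filter (fun j => bRowMidB s t off (r + 1) r j) =
        (List.range (t.length + 1)).filter (fun j => emitB s t r j && decide (j ≤ c)) := by
      refine List.filter_congr (fun j hj => ?_)
      rw [List.mem_range] at hj
      unfold bRowMidB
      cases hEx : emitB s t r j
      · simp
      · simp only [Bool.true_and]
        simp only [← Bool.decide_and, ← Bool.decide_or]
        rw [decide_eq_decide]
        omega
    rw [hlt, hle, filter_le_of_lt_append (fun j => emitB s t r j) c hE _ hc,
        List.map_append]
    rfl
  · rw [if_neg hri]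
    congr 1
    refine List.filter_congr (fun j _ => ?_)
    unfold bRowMidB
    have : (decide (r < i)) = (decide (r < i + 1)) := by rw [decide_eq_decide]; omega
    rw [this]

-- before any diagonal row is flushed the middle state is the incoming buckets
lemma bucketsAt_to_mid (type1 : String) (s t : List Char) (off : Int) (loN : Nat)
    (hlo : (loN : Int) = max 0 (-off)) :
    bucketsAt type1 s t off = bucketsMid type1 s t off loN := by
  unfold bucketsAt bucketsMid
  refine List.map_congr_left (fun r _ => ?_)
  congr 1
  refine List.filter_congr (fun j hj => ?_)
  rw [List.mem_range] at hj
  unfold bRowB bRowMidB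
  cases hE : emitB s t r j
  · simp
  · simp only [Bool.true_and]
    simp only [← Bool.decide_and, ← Bool.decide_or]
    rw [decide_eq_decide]
    omega

-- after the last diagonal row the middle state is the outgoing buckets
lemma mid_top_eq_next (type1 : String) (s t : List Char) (off : Int) (hiN : Nat)
    (hhi : (hiN : Int) = min ((s.length : Int)) ((t.length : Int) - off)) :
    bucketsMid type1 s t off (hiN + 1) = bucketsAt type1 s t (off + 1) := by
  unfold bucketsAt bucketsMid
  refine List.map_congr_left (fun r hr => ?_)
  rw [List.mem_range] at hr
  congr 1
  refine List.filter_congr (fun j hj => ?_)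
  rw [List.mem_range] at hj
  unfold bRowB bRowMidB
  cases hE : emitB s t r j
  · simp
  · simp only [Bool.true_and]
    simp only [← Bool.decide_and, ← Bool.decide_or]
    rw [decide_eq_decide]
    omega

-- the state of B's walk along diagonal off after K steps
lemma walk_loop (type1 type2 : String) (off : Int)
    (_hn0 : off ≤ (type2.toList.length : Int))
    (loN hiN : Nat)
    (hlo : (loN : Int) = max 0 (-off))
    (hhi : (hiN : Int) = min ((type1.toList.length : Int)) ((type2.toList.length : Int) - off)) :
    ∀ K, loN + K ≤ hiN →
      (List.range K).foldl
        (fun (st : Int × List (List String)) (k : Nat) =>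
          if PySem.Str.pyGet? type1 ((loN + k : Nat) : Int) =
              PySem.Str.pyGet? type2 (((loN + k : Nat) : Int) + off) then
            (st.1 + 1, st.2)
          else if st.1 ≥ 2 then
            ((0 : Int), pvBump st.2 ((loN + k : Nat) : Int)
              (PySem.Str.slice type1 (some (((loN + k : Nat) : Int) - st.1))
                (some ((loN + k : Nat) : Int))))
          else ((0 : Int), st.2))
        ((0 : Int), bucketsMid type1 type1.toList type2.toList off loN) =
      ((runLen type1.toList type2.toList (loN + K) ((((loN + K : Nat)) : Int) + off).toNat : Int),
        bucketsMid type1 type1.toList type2.toList off (loN + K)) := by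
  intro K
  induction K with
  | zero =>
    intro _
    have h0 : runLen type1.toList type2.toList loN (((loN : Nat) : Int) + off).toNat = 0 := by
      rcases le_or_gt 0 off with h | h
      · have hz : loN = 0 := by omega
        subst hz
        simp [runLen_zero_left]
      · have hz : (((loN : Nat) : Int) + off).toNat = 0 := by omega
        rw [hz, runLen_zero_right]
    simp [h0]
  | succ K ih =>
    intro hK
    rw [List.range_succ, List.foldl_append, ih (by omega)]
    simp only [List.foldl_cons, List.foldl_nil]
    have him : loN + K < type1.toList.length := by omega
    obtain ⟨jI, hjc⟩ : ∃ jI : Nat, ((jI : Nat) : Int) = ((loN + K : Nat) : Int) + off :=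
      ⟨((((loN + K : Nat)) : Int) + off).toNat, by omega⟩
    have hjget : ((((loN + K : Nat)) : Int) + off).toNat = jI := by omega
    have hjn : jI < type2.toList.length := by omega
    have hstep : (loN + (K + 1)) = loN + K + 1 := by omega
    have hsucc : ((((loN + K + 1 : Nat)) : Int) + off).toNat = jI + 1 := by omega
    rw [hstep, hsucc, hjget]
    rw [← hjc, PySem.Str.pyGet?_natCast, PySem.Str.pyGet?_natCast]
    by_cases hcc : type1.toList[loN + K]? = type2.toList[jI]?
    · rw [if_pos hcc]
      simp only [Prod.mk.injEq]
      constructor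
      · rw [runLen_succ, if_pos ⟨him, hjn, hcc⟩]
        push_cast
        ring
      · refine bucketsMid_congr_succ type1 type1.toList type2.toList off (loN + K)
          (fun j hj hd => ?_)
        have hji : j = jI := by omega
        rw [hji]
        cases hx : emitB type1.toList type2.toList (loN + K) jI
        · rfl
        · rcases (emitB_eq_true_iff type1.toList type2.toList (loN + K) jI).mp hx with
            ⟨_, h | h | h⟩
          · omega
          · omega
          · exact (h hcc).elim
    · rw [if_neg hcc]
      have hr0 : runLen type1.toList type2.toList ((loN + K) + 1) (jI + 1) = 0 := by
        rw [runLen_succ, if_neg (fun hh => hcc hh.2.2)]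
      by_cases hge : ((runLen type1.toList type2.toList (loN + K) jI : Int) ≥ 2)
      · rw [if_pos hge]
        simp only [Prod.mk.injEq]
        constructor
        · simp [hr0]
        · have hsub : PySem.Str.slice type1
              (some (((loN + K : Nat) : Int) - (runLen type1.toList type2.toList (loN + K) jI : Int)))
              (some ((loN + K : Nat) : Int)) =
              subAt type1 (runLen type1.toList type2.toList (loN + K) jI) (loN + K) := rfl
          rw [hsub]
          refine bucketsMid_bump type1 type1.toList type2.toList off (loN + K) jI
            (by omega) (by omega) (by omega) ?_
          rw [emitB_eq_true_iff]
          exact ⟨by omega, Or.inr (Or.inr hcc)⟩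
      · rw [if_neg hge]
        simp only [Prod.mk.injEq]
        constructor
        · simp [hr0]
        · refine bucketsMid_congr_succ type1 type1.toList type2.toList off (loN + K)
            (fun j hj hd => ?_)
          have hji : j = jI := by omega
          rw [hji]
          cases hx : emitB type1.toList type2.toList (loN + K) jI
          · rfl
          · have := ((emitB_eq_true_iff type1.toList type2.toList (loN + K) jI).mp hx).1
            omega

-- one diagonal of B advances the bucket bound by one
lemma diag_loop (type1 type2 : String) (off : Int)
    (hm0 : -(type1.toList.length : Int) ≤ off) (hn0 : off ≤ (type2.toList.length : Int)) :
    diagStep type1 type2 (bucketsAt type1 type1.toList type2.toList off) off =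
      bucketsAt type1 type1.toList type2.toList (off + 1) := by
  unfold diagStep
  simp only []
  obtain ⟨loN, hlo⟩ : ∃ loN : Nat, (loN : Int) = max 0 (-off) := ⟨(max 0 (-off)).toNat, by omega⟩
  obtain ⟨hiN, hhi⟩ : ∃ hiN : Nat,
      (hiN : Int) = min ((type1.toList.length : Int)) ((type2.toList.length : Int) - off) :=
    ⟨(min ((type1.toList.length : Int)) ((type2.toList.length : Int) - off)).toNat, by omega⟩
  have hle : loN ≤ hiN := by omega
  rw [PySem.List.pyRange_one]
  have hKeq : ((min ((type1.toList.length : Int)) ((type2.toList.length : Int) - off)) -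
      max 0 (-off)).toNat = hiN - loN := by omega
  rw [hKeq, List.foldl_map]
  simp only [← hlo, ← Nat.cast_add]
  rw [bucketsAt_to_mid type1 type1.toList type2.toList off loN hlo,
      walk_loop type1 type2 off hn0 loN hiN hlo hhi (hiN - loN) (by omega)]
  have htop : loN + (hiN - loN) = hiN := by omega
  rw [htop]
  have hhieq : min ((type1.toList.length : Int)) ((type2.toList.length : Int) - off) =
      ((hiN : Nat) : Int) := hhi.symm
  rw [hhieq]
  set jT : Nat := (((hiN : Nat) : Int) + off).toNat with hjT
  have hjc : ((jT : Nat) : Int) = (hiN : Int) + off := by omega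
  have hjn : jT < type2.toList.length + 1 := by omega
  by_cases hge : ((runLen type1.toList type2.toList hiN jT : Int) ≥ 2)
  · rw [if_pos hge]
    have hsub : PySem.Str.slice type1
        (some (((hiN : Nat) : Int) - (runLen type1.toList type2.toList hiN jT : Int)))
        (some ((hiN : Nat) : Int)) =
        subAt type1 (runLen type1.toList type2.toList hiN jT) hiN := rfl
    rw [hsub]
    have hEtop : emitB type1.toList type2.toList hiN jT = true := by
      rw [emitB_eq_true_iff]
      refine ⟨by omega, ?_⟩
      have hcase : hiN = type1.toList.length ∨ jT = type2.toList.length := by omega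
      rcases hcase with h | h
      · exact Or.inl h
      · exact Or.inr (Or.inl h)
    rw [bucketsMid_bump type1 type1.toList type2.toList off hiN jT (by omega) hjn hjc hEtop]
    exact mid_top_eq_next type1 type1.toList type2.toList off hiN hhi
  · rw [if_neg hge]
    have hns : bucketsMid type1 type1.toList type2.toList off hiN =
        bucketsMid type1 type1.toList type2.toList off (hiN + 1) := by
      refine bucketsMid_congr_succ type1 type1.toList type2.toList off hiN (fun j hj hd => ?_)
      have hji : j = jT := by omega
      subst hji
      cases hx : emitB type1.toList type2.toList hiN jT
      · rfl
      · have := ((emitB_eq_true_iff type1.toList type2.toList hiN jT).mp hx).1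
        omega
    rw [hns]
    exact mid_top_eq_next type1 type1.toList type2.toList off hiN hhi

-- the empty buckets are the bucket state before any diagonal
lemma buckets0_eq (type1 type2 : String) :
    (List.range (type1.toList.length + 1)).map (fun _ => ([] : List String)) =
      bucketsAt type1 type1.toList type2.toList (-(type1.toList.length : Int)) := by
  unfold bucketsAt
  refine List.map_congr_left (fun r hr => ?_)
  rw [List.mem_range] at hr
  have h : (List.range (type2.toList.length + 1)).filter
      (fun j => bRowB type1.toList type2.toList (-(type1.toList.length : Int)) r j) = [] := by
    rw [List.filter_eq_nil_iff]
    intro j hj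
    rw [List.mem_range] at hj
    unfold bRowB
    simp only [Bool.and_eq_true, decide_eq_true_eq, not_and]
    intro _
    omega
  rw [h]
  rfl

-- after the last diagonal the buckets flatten to the canonical emission list
lemma bucketsAt_final (type1 type2 : String) :
    (bucketsAt type1 type1.toList type2.toList ((type2.toList.length : Int) + 1)).flatMap
      (fun row => row) = canonical type1 type1.toList type2.toList := by
  unfold bucketsAt canonical
  simp only [List.flatMap_map]
  have h : (fun r => ((List.range (type2.toList.length + 1)).filter
        (fun j => bRowB type1.toList type2.toList ((type2.toList.length : Int) + 1) r j)).map
        (fun j => subAt type1 (runLen type1.toList type2.toList r j) r)) =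
      (fun r => rowOut type1 type1.toList type2.toList r) := by
    funext r
    unfold rowOut
    congr 1
    refine List.filter_congr (fun j hj => ?_)
    rw [List.mem_range] at hj
    unfold bRowB
    have hd : (decide ((j : Int) < (r : Int) + ((type2.toList.length : Int) + 1))) = true := by
      simp only [decide_eq_true_eq]
      omega
    rw [hd, Bool.and_true]
  rw [h]

-- B equals the canonical row-major emission list
lemma algoB_eq (type1 type2 : String) :
    algorithm_alt type1 type2 = canonical type1 type1.toList type2.toList := by
  show List.flatMap (fun row => row)
      ((PySem.List.pyRange (-(type1.toList.length : Int)) ((type2.toList.length : Int) + 1) 1).foldl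
        (fun bks off => diagStep type1 type2 bks off)
        ((PySem.List.pyRange 0 ((type1.toList.length : Int) + 1) 1).map
          (fun _ => ([] : List String)))) =
    canonical type1 type1.toList type2.toList
  rw [PySem.List.pyRange_one (-(type1.toList.length : Int)) ((type2.toList.length : Int) + 1)]
  have hK : (((type2.toList.length : Int) + 1) - -(type1.toList.length : Int)).toNat =
      type1.toList.length + type2.toList.length + 1 := by omega
  rw [hK, List.foldl_map]
  -- initial buckets
  have e1 : ((type1.toList.length : Int) + 1 - 0).toNat = type1.toList.length + 1 := by omega
  rw [PySem.List.pyRange_one 0 ((type1.toList.length : Int) + 1)]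
  simp only [e1, List.map_map, Function.comp_def]
  rw [buckets0_eq type1 type2]
  have main : ∀ K, K ≤ type1.toList.length + type2.toList.length + 1 →
      (List.range K).foldl
        (fun bks (k : Nat) => diagStep type1 type2 bks (-(type1.toList.length : Int) + (k : Int)))
        (bucketsAt type1 type1.toList type2.toList (-(type1.toList.length : Int))) =
      bucketsAt type1 type1.toList type2.toList (-(type1.toList.length : Int) + (K : Int)) := by
    intro K
    induction K with
    | zero => intro _; simp
    | succ K ih =>
      intro hK
      rw [List.range_succ, List.foldl_append, ih (by omega)]
      simp only [List.foldl_cons, List.foldl_nil]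
      rw [diag_loop type1 type2 (-(type1.toList.length : Int) + (K : Int)) (by omega) (by omega)]
      congr 1
      push_cast
      ring
  rw [main (type1.toList.length + type2.toList.length + 1) (le_refl _)]
  have e2 : (-(type1.toList.length : Int) +
      ((type1.toList.length + type2.toList.length + 1 : Nat) : Int)) =
      ((type2.toList.length : Int) + 1) := by push_cast; ring
  rw [e2]
  exact bucketsAt_final type1 type2

-- ===== VERDICT (by name: the statement is the Claim_ definition above) =====
theorem algorithm_spec : Claim_equal_algorithm := by
  intro type1 type2 _
  unfold Spec_algorithm
  rw [algoA_eq, algoB_eq]
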